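-- pv_equiv track=rewrite | github.com/JMaskiewicz/my-leetcode | solving_3.py | preprocess_throws
-- ===== SOURCE A (Python) =====
-- from collections import defaultdict
--
-- def preprocess_throws(players):
--     vertical, horizontal = defaultdict(list), defaultdict(list)
--     diagonal1, diagonal2 = defaultdict(list), defaultdict(list)
--
--     for idx, (x, y) in enumerate(players):
--         player_number = idx + 1  # 1-based index
--
--         # Store players by vertical and horizontal alignment
--         vertical[x].append((y, player_number))  # Sorted by y
--         horizontal[y].append((x, player_number))  # Sorted by x
--
--         b1 = y - x  # Line equation y = x - b
--         b2 = y + x  # Line equation y = x + b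
--
--         diagonal1[b1].append((x, player_number))
--         diagonal2[b2].append((x, player_number))
--
--     # Sort players in each group for fast nearest-neighbor lookup
--     for d in [vertical, horizontal, diagonal1, diagonal2]:
--         for key in d:
--             d[key].sort()
--
--     return vertical, horizontal, diagonal1, diagonal2
-- ===== SOURCE B (Python) =====
-- from collections import defaultdict
--
-- def preprocess_throws(players):
--     pts = [(i + 1, x, y) for i, (x, y) in enumerate(players)]
--
--     def group(key, val):
--         g = defaultdict(list)
--         for k in dict.fromkeys(key(p) for p in pts):
--             g[k] = sorted(val(p) for p in pts if key(p) == k)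
--         return g
--
--     vertical   = group(lambda p: p[1], lambda p: (p[2], p[0]))
--     horizontal = group(lambda p: p[2], lambda p: (p[1], p[0]))
--     diagonal1  = group(lambda p: p[2] - p[1], lambda p: (p[1], p[0]))
--     diagonal2  = group(lambda p: p[2] + p[1], lambda p: (p[1], p[0]))
--     return vertical, horizontal, diagonal1, diagonal2
-- ===== Notes on version B (the rewrite author's own statement) =====
-- stated objective: alternative
-- what changed: A makes one pass appending each player into four defaultdicts and then sorts every bucket in place; B enumerates the players once into triples and builds each group directly per distinct key (dict.fromkeys dedup, filter, sorted), with no incremental dict mutation and no final sorting pass.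
import Mathlib
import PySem

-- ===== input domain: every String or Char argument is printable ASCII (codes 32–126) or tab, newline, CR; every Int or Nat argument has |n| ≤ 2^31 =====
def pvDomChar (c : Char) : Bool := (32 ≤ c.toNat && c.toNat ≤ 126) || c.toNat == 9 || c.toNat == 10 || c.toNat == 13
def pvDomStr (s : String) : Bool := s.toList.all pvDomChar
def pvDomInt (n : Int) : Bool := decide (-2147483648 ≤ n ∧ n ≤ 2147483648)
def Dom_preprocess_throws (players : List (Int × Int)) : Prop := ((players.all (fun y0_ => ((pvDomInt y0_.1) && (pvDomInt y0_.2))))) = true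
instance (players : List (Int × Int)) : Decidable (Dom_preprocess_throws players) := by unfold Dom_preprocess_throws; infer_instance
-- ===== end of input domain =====

-- B replaces A's one-pass dict building with a final per-bucket sort by a different
-- decomposition: for each grouping it dedups the keys and builds each group directly
-- (filter the enumerated players per distinct key, then sort); same results, alternative structure.

-- ===== PORT A =====
-- 'for key in d: d[key].sort()' — each value is sorted in place, key order unchanged
def pvSortVals (d : PySem.Dict Int (List (Int × Int))) : PySem.Dict Int (List (Int × Int)) :=
  PySem.Dict.mk (d.items.map (fun kv =>
    (kv.1, PySem.List.sorted2 kv.2 (fun e => e.1) (fun e => e.2) false)))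

def preprocess_throws (players : List (Int × Int)) : (List (Int × List (Int × Int))) × (List (Int × List (Int × Int))) × (List (Int × List (Int × Int))) × (List (Int × List (Int × Int))) :=
  let st :=
    (PySem.List.enumerate players 0).foldl
      (fun (st : PySem.Dict Int (List (Int × Int)) × PySem.Dict Int (List (Int × Int)) ×
                 PySem.Dict Int (List (Int × Int)) × PySem.Dict Int (List (Int × Int))) ip =>
        (st.1.modify ip.2.1 [] (· ++ [(ip.2.2, ip.1 + 1)]),
         st.2.1.modify ip.2.2 [] (· ++ [(ip.2.1, ip.1 + 1)]),
         st.2.2.1.modify (ip.2.2 - ip.2.1) [] (· ++ [(ip.2.1, ip.1 + 1)]),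
         st.2.2.2.modify (ip.2.2 + ip.2.1) [] (· ++ [(ip.2.1, ip.1 + 1)])))
      (PySem.Dict.empty, PySem.Dict.empty, PySem.Dict.empty, PySem.Dict.empty)
  ((pvSortVals st.1).items, (pvSortVals st.2.1).items,
   (pvSortVals st.2.2.1).items, (pvSortVals st.2.2.2).items)

-- ===== PORT B =====
-- the inner 'group' helper of Source B: per distinct key (dict.fromkeys order), filter and sort
def pvGroup (pts : List (Int × Int × Int)) (key : Int × Int × Int → Int)
    (val : Int × Int × Int → Int × Int) : List (Int × List (Int × Int)) :=
  (PySem.List.dedup (pts.map key)).map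
    (fun k => (k, PySem.List.sorted2 ((pts.filter (fun p => key p == k)).map val)
                    (fun e => e.1) (fun e => e.2) false))

def preprocess_throws_alt (players : List (Int × Int)) : (List (Int × List (Int × Int))) × (List (Int × List (Int × Int))) × (List (Int × List (Int × Int))) × (List (Int × List (Int × Int))) :=
  let pts := (PySem.List.enumerate players 0).map (fun ip => (ip.1 + 1, ip.2.1, ip.2.2))
  (pvGroup pts (fun p => p.2.1) (fun p => (p.2.2, p.1)),
   pvGroup pts (fun p => p.2.2) (fun p => (p.2.1, p.1)),
   pvGroup pts (fun p => p.2.2 - p.2.1) (fun p => (p.2.1, p.1)),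
   pvGroup pts (fun p => p.2.2 + p.2.1) (fun p => (p.2.1, p.1)))

-- ===== PRECONDITION & SPEC =====
def Spec_preprocess_throws (players : List (Int × Int)) (out : (List (Int × List (Int × Int))) × (List (Int × List (Int × Int))) × (List (Int × List (Int × Int))) × (List (Int × List (Int × Int)))) : Prop := out = preprocess_throws_alt players
instance (players : List (Int × Int)) (out : (List (Int × List (Int × Int))) × (List (Int × List (Int × Int))) × (List (Int × List (Int × Int))) × (List (Int × List (Int × Int)))) : Decidable (Spec_preprocess_throws players out) := by
  unfold Spec_preprocess_throws
  exact @instDecidableEqProd _ _ _ (@instDecidableEqProd _ _ _ (@instDecidableEqProd _ _ _ _)) _ _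

-- ===== CLAIM (what is proved, stated in full; the proofs are below) =====
def Claim_equal_preprocess_throws : Prop := ∀ (players : List (Int × Int)), Dom_preprocess_throws players → Spec_preprocess_throws players (preprocess_throws players)

-- ===== LEMMAS AND PROOFS =====

-- the group of key k collected so far, in append (input) order
def pvFilt {α : Type} (l : List α) (f : α → Int) (g : α → Int × Int) (k : Int) :
    List (Int × Int) :=
  (l.filter (fun p => f p == k)).map g

lemma pvFilt_append_singleton {α : Type} (l : List α) (p : α) (f : α → Int)
    (g : α → Int × Int) (k : Int) :
    pvFilt (l ++ [p]) f g k = pvFilt l f g k ++ if f p == k then [g p] else [] := by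
  simp only [pvFilt, List.filter_append, List.map_append]
  congr 1
  by_cases h : f p = k <;> simp [h]

lemma pvGet_map (K : List Int) (v : Int → List (Int × Int)) (k : Int) :
    (PySem.Dict.mk (K.map (fun k' => (k', v k')))).get? k
      = if k ∈ K then some (v k) else none := by
  induction K with
  | nil => simp [PySem.Dict.get?]
  | cons a K ih =>
    simp only [List.map_cons, PySem.Dict.get?_mk_cons, ih, List.mem_cons]
    by_cases h : a = k
    · simp [h]
    · have h' : ¬ k = a := fun he => h he.symm
      simp [h, h', beq_iff_eq]

lemma pvContains_map (K : List Int) (v : Int → List (Int × Int)) (k : Int) :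
    (PySem.Dict.mk (K.map (fun k' => (k', v k')))).contains k = decide (k ∈ K) := by
  by_cases h : k ∈ K
  · simp only [PySem.Dict.contains, List.any_map, h, decide_true]
    simp only [List.any_eq_true]
    exact ⟨k, h, by simp⟩
  · simp only [PySem.Dict.contains, List.any_map, h, decide_false]
    simp only [List.any_eq_false]
    intro k' hk'
    simp only [Function.comp, beq_iff_eq]
    intro he; exact h (he ▸ hk')

-- the heart: A's append-into-dict fold, characterised per distinct key
lemma pvBld_items {α : Type} (l : List α) (f : α → Int) (g : α → Int × Int) :
    (l.foldl (fun d p => d.modify (f p) [] (fun w => w ++ [g p])) PySem.Dict.empty).items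
      = (PySem.List.dedup (l.map f)).map (fun k => (k, pvFilt l f g k)) := by
  induction l using List.reverseRecOn with
  | nil => rfl
  | append_singleton l p ih =>
    rw [List.foldl_append]
    have hD : (l.foldl (fun d p => d.modify (f p) [] (fun w => w ++ [g p])) PySem.Dict.empty)
        = PySem.Dict.mk ((PySem.List.dedup (l.map f)).map
            (fun k => (k, pvFilt l f g k))) := by
      apply PySem.Dict.ext; exact ih
    rw [hD]
    set K := PySem.List.dedup (l.map f) with hK
    have hdd : PySem.List.dedup ((l ++ [p]).map f) = PySem.Set.add K (f p) := by
      simp only [PySem.List.dedup_eq_ofList, List.map_append, PySem.Set.ofList_eq_foldl,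
        List.foldl_append, List.map_cons, List.map_nil, List.foldl_cons, List.foldl_nil]
      rw [hK, PySem.List.dedup_eq_ofList, PySem.Set.ofList_eq_foldl]
    simp only [List.foldl_cons, List.foldl_nil]
    by_cases h : f p ∈ K
    · -- existing key: value extended in place
      have hadd : PySem.Set.add K (f p) = K := by
        simp [PySem.Set.add, PySem.Set.contains, h]
      rw [hdd, hadd]
      simp only [PySem.Dict.modify, PySem.Dict.insert, PySem.Dict.getD,
        pvGet_map K (fun k => pvFilt l f g k), pvContains_map K (fun k => pvFilt l f g k), h,
        decide_true, if_true, Option.getD_some]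
      simp only [List.map_map]
      apply List.map_congr_left
      intro k hk
      simp only [Function.comp]
      rw [pvFilt_append_singleton]
      by_cases hke : k = f p
      · simp [hke]
      · simp [hke, beq_iff_eq, Ne.symm hke]
    · -- new key: appended at the end with a fresh one-element group
      have hadd : PySem.Set.add K (f p) = K ++ [f p] := by
        simp [PySem.Set.add, PySem.Set.contains, h]
      rw [hdd, hadd]
      have hnl : f p ∉ l.map f := by
        rw [hK, PySem.List.dedup_eq_ofList] at h
        intro hc; exact h ((PySem.Set.mem_ofList _ _).mpr hc)
      simp only [PySem.Dict.modify, PySem.Dict.insert, PySem.Dict.getD,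
        pvGet_map K (fun k => pvFilt l f g k), pvContains_map K (fun k => pvFilt l f g k), h,
        decide_false, Bool.false_eq_true, if_false, Option.getD_none]
      simp only [List.map_append, List.map_cons, List.map_nil]
      congr 1
      · apply List.map_congr_left
        intro k hk
        rw [pvFilt_append_singleton]
        have : f p ≠ k := fun he => h (he ▸ hk)
        simp [this, beq_iff_eq]
      · have hnilf : pvFilt l f g (f p) = [] := by
          simp only [pvFilt, List.map_eq_nil_iff, List.filter_eq_nil_iff]
          intro q hq
          simp only [beq_iff_eq]
          intro he
          exact hnl (he ▸ List.mem_map_of_mem hq)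
        rw [pvFilt_append_singleton, hnilf]
        simp
    
-- split the single four-dict fold into four independent folds
lemma pvFold_split (l : List (Int × (Int × Int))) :
    l.foldl
      (fun (st : PySem.Dict Int (List (Int × Int)) × PySem.Dict Int (List (Int × Int)) ×
                 PySem.Dict Int (List (Int × Int)) × PySem.Dict Int (List (Int × Int))) ip =>
        (st.1.modify ip.2.1 [] (· ++ [(ip.2.2, ip.1 + 1)]),
         st.2.1.modify ip.2.2 [] (· ++ [(ip.2.1, ip.1 + 1)]),
         st.2.2.1.modify (ip.2.2 - ip.2.1) [] (· ++ [(ip.2.1, ip.1 + 1)]),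
         st.2.2.2.modify (ip.2.2 + ip.2.1) [] (· ++ [(ip.2.1, ip.1 + 1)])))
      (PySem.Dict.empty, PySem.Dict.empty, PySem.Dict.empty, PySem.Dict.empty)
    = (l.foldl (fun d ip => d.modify ip.2.1 [] (· ++ [(ip.2.2, ip.1 + 1)])) PySem.Dict.empty,
       l.foldl (fun d ip => d.modify ip.2.2 [] (· ++ [(ip.2.1, ip.1 + 1)])) PySem.Dict.empty,
       l.foldl (fun d ip => d.modify (ip.2.2 - ip.2.1) [] (· ++ [(ip.2.1, ip.1 + 1)])) PySem.Dict.empty,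
       l.foldl (fun d ip => d.modify (ip.2.2 + ip.2.1) [] (· ++ [(ip.2.1, ip.1 + 1)])) PySem.Dict.empty) := by
  have h1 :
      l.foldl
        (fun (st : PySem.Dict Int (List (Int × Int)) × PySem.Dict Int (List (Int × Int)) ×
                   PySem.Dict Int (List (Int × Int)) × PySem.Dict Int (List (Int × Int))) ip =>
          (st.1.modify ip.2.1 [] (· ++ [(ip.2.2, ip.1 + 1)]),
           st.2.1.modify ip.2.2 [] (· ++ [(ip.2.1, ip.1 + 1)]),
           st.2.2.1.modify (ip.2.2 - ip.2.1) [] (· ++ [(ip.2.1, ip.1 + 1)]),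
           st.2.2.2.modify (ip.2.2 + ip.2.1) [] (· ++ [(ip.2.1, ip.1 + 1)])))
        (PySem.Dict.empty, PySem.Dict.empty, PySem.Dict.empty, PySem.Dict.empty)
      = (l.foldl (fun d ip => d.modify ip.2.1 [] (· ++ [(ip.2.2, ip.1 + 1)])) PySem.Dict.empty,
         l.foldl
           (fun (st : PySem.Dict Int (List (Int × Int)) × PySem.Dict Int (List (Int × Int)) ×
                      PySem.Dict Int (List (Int × Int))) ip =>
             (st.1.modify ip.2.2 [] (· ++ [(ip.2.1, ip.1 + 1)]),
              st.2.1.modify (ip.2.2 - ip.2.1) [] (· ++ [(ip.2.1, ip.1 + 1)]),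
              st.2.2.modify (ip.2.2 + ip.2.1) [] (· ++ [(ip.2.1, ip.1 + 1)])))
           (PySem.Dict.empty, PySem.Dict.empty, PySem.Dict.empty)) :=
    PySem.List.foldl_prod_mk
      (fun d ip => PySem.Dict.modify d ip.2.1 [] (· ++ [(ip.2.2, ip.1 + 1)]))
      (fun st ip =>
        (PySem.Dict.modify st.1 ip.2.2 [] (· ++ [(ip.2.1, ip.1 + 1)]),
         PySem.Dict.modify st.2.1 (ip.2.2 - ip.2.1) [] (· ++ [(ip.2.1, ip.1 + 1)]),
         PySem.Dict.modify st.2.2 (ip.2.2 + ip.2.1) [] (· ++ [(ip.2.1, ip.1 + 1)]))) l _ _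
  have h2 :
      l.foldl
        (fun (st : PySem.Dict Int (List (Int × Int)) × PySem.Dict Int (List (Int × Int)) ×
                   PySem.Dict Int (List (Int × Int))) ip =>
          (st.1.modify ip.2.2 [] (· ++ [(ip.2.1, ip.1 + 1)]),
           st.2.1.modify (ip.2.2 - ip.2.1) [] (· ++ [(ip.2.1, ip.1 + 1)]),
           st.2.2.modify (ip.2.2 + ip.2.1) [] (· ++ [(ip.2.1, ip.1 + 1)])))
        (PySem.Dict.empty, PySem.Dict.empty, PySem.Dict.empty)
      = (l.foldl (fun d ip => d.modify ip.2.2 [] (· ++ [(ip.2.1, ip.1 + 1)])) PySem.Dict.empty,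
         l.foldl
           (fun (st : PySem.Dict Int (List (Int × Int)) × PySem.Dict Int (List (Int × Int))) ip =>
             (st.1.modify (ip.2.2 - ip.2.1) [] (· ++ [(ip.2.1, ip.1 + 1)]),
              st.2.modify (ip.2.2 + ip.2.1) [] (· ++ [(ip.2.1, ip.1 + 1)])))
           (PySem.Dict.empty, PySem.Dict.empty)) :=
    PySem.List.foldl_prod_mk
      (fun d ip => PySem.Dict.modify d ip.2.2 [] (· ++ [(ip.2.1, ip.1 + 1)]))
      (fun st ip =>
        (PySem.Dict.modify st.1 (ip.2.2 - ip.2.1) [] (· ++ [(ip.2.1, ip.1 + 1)]),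
         PySem.Dict.modify st.2 (ip.2.2 + ip.2.1) [] (· ++ [(ip.2.1, ip.1 + 1)]))) l _ _
  have h3 :
      l.foldl
        (fun (st : PySem.Dict Int (List (Int × Int)) × PySem.Dict Int (List (Int × Int))) ip =>
          (st.1.modify (ip.2.2 - ip.2.1) [] (· ++ [(ip.2.1, ip.1 + 1)]),
           st.2.modify (ip.2.2 + ip.2.1) [] (· ++ [(ip.2.1, ip.1 + 1)])))
        (PySem.Dict.empty, PySem.Dict.empty)
      = (l.foldl (fun d ip => d.modify (ip.2.2 - ip.2.1) [] (· ++ [(ip.2.1, ip.1 + 1)])) PySem.Dict.empty,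
         l.foldl (fun d ip => d.modify (ip.2.2 + ip.2.1) [] (· ++ [(ip.2.1, ip.1 + 1)])) PySem.Dict.empty) :=
    PySem.List.foldl_prod_mk
      (fun d ip => PySem.Dict.modify d (ip.2.2 - ip.2.1) [] (· ++ [(ip.2.1, ip.1 + 1)]))
      (fun d ip => PySem.Dict.modify d (ip.2.2 + ip.2.1) [] (· ++ [(ip.2.1, ip.1 + 1)])) l _ _
  rw [h1, h2, h3]

-- one grouping: A's dict (built by appending, then value-sorted) = B's pvGroup
lemma pvComponent (E : List (Int × (Int × Int))) (f : Int × (Int × Int) → Int)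
    (g : Int × (Int × Int) → Int × Int) :
    (pvSortVals (E.foldl (fun d ip => d.modify (f ip) [] (· ++ [g ip])) PySem.Dict.empty)).items
      = (PySem.List.dedup (E.map f)).map
          (fun k => (k, PySem.List.sorted2 (pvFilt E f g k) (fun e => e.1) (fun e => e.2) false)) := by
  simp only [pvSortVals, pvBld_items E f g, List.map_map]
  rfl

-- B's pvGroup over the mapped triples, rewritten over the enumeration itself
lemma pvGroup_eq (E : List (Int × (Int × Int))) (key : Int × Int × Int → Int)
    (val : Int × Int × Int → Int × Int) :
    pvGroup (E.map (fun ip => (ip.1 + 1, ip.2.1, ip.2.2))) key val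
      = (PySem.List.dedup (E.map (fun ip => key (ip.1 + 1, ip.2.1, ip.2.2)))).map
          (fun k => (k, PySem.List.sorted2
            (pvFilt E (fun ip => key (ip.1 + 1, ip.2.1, ip.2.2))
              (fun ip => val (ip.1 + 1, ip.2.1, ip.2.2)) k)
            (fun e => e.1) (fun e => e.2) false)) := by
  simp only [pvGroup, pvFilt, List.map_map, List.filter_map, Function.comp_def]

-- ===== VERDICT (by name: the statement is the Claim_ definition above) =====
theorem preprocess_throws_spec : Claim_equal_preprocess_throws := by
  intro players _
  unfold Spec_preprocess_throws preprocess_throws preprocess_throws_alt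
  simp only [pvFold_split]
  refine Prod.ext ?_ (Prod.ext ?_ (Prod.ext ?_ ?_)) <;>
    simp only [pvGroup_eq, pvComponent]
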